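-- pv_equiv track=rewrite | github.com/r-nikhil/GTOInspector-processing-engine | proc_engine/adda52parser.py | process_action_sequence
-- ===== SOURCE A (Python) =====
-- def process_action_sequence(action_sequence: list) -> list:
--     int_action_sequence = []
--     all_action_sequences = []
--     for action in action_sequence:
--         if "fold" in action.lower():
--             if "hero" in action:
--                 all_action_sequences.append(
--                     int_action_sequence + ["hero fold"])
--             int_action_sequence.append("fold")
--         elif "raise" in action.lower():
--             if "hero" in action:
--                 all_action_sequences.append(
--                     int_action_sequence + ["hero raise"])
--             int_action_sequence.append("raise")
--         elif "call" in action.lower():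
--             if "hero" in action:
--                 all_action_sequences.append(
--                     int_action_sequence + ["hero call"])
--             int_action_sequence.append("call")
--         elif "check" in action.lower():
--             if "hero" in action:
--                 all_action_sequences.append(
--                     int_action_sequence + ["hero check"])
--             int_action_sequence.append("check")
--         elif "all-in" in action.lower():
--             if "hero" in action:
--                 all_action_sequences.append(
--                     int_action_sequence + ["hero all-in"])
--             int_action_sequence.append("all-in")
--     return all_action_sequences
-- ===== SOURCE B (Python) =====
-- _KEYWORDS = ["fold", "raise", "call", "check", "all-in"]
--
--
-- def process_action_sequence(action_sequence: list) -> list: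
--     # Pass 1: classify each action to (canonical keyword, is-hero flag),
--     # skipping actions that match no keyword.
--     tagged = []
--     for action in action_sequence:
--         low = action.lower()
--         for kw in _KEYWORDS:
--             if kw in low:
--                 tagged.append((kw, "hero" in action))
--                 break
--     # Pass 2: a hero action at position i snapshots the canonical prefix before it.
--     canon = [kw for kw, _ in tagged]
--     return [canon[:i] + ["hero " + kw]
--             for i, (kw, hero) in enumerate(tagged) if hero]
-- ===== Notes on version B (the rewrite author's own statement) =====
-- stated objective: simpler
-- what changed: Replaces the five copy-pasted if-elif branches and the running snapshot list with a two-pass design: one classification pass mapping each action to its first matching canonical keyword plus a hero flag, then a comprehension that rebuilds each hero snapshot as a slice of the canonical sequence.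
import Mathlib
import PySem

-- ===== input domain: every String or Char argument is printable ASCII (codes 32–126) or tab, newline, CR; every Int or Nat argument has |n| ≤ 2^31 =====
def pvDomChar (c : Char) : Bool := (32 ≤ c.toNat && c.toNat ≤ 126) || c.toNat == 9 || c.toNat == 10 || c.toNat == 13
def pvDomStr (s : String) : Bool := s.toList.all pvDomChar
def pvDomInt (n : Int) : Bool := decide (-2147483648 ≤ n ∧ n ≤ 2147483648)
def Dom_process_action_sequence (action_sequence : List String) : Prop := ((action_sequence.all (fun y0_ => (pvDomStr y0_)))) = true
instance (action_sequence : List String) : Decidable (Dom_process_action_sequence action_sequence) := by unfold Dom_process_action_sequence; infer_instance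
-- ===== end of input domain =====

-- B replaces A's five copy-pasted if-elif branches and running snapshot list with a
-- classify pass (first matching keyword + hero flag) and a slice-based snapshot pass (objective: simpler).

-- ===== PORT A =====
def pvStepA (st : List String × List (List String)) (action : String) :
    List String × List (List String) :=
  if PySem.Str.isIn "fold" (PySem.Str.lower action) then
    (st.1 ++ ["fold"],
     if PySem.Str.isIn "hero" action then st.2 ++ [st.1 ++ ["hero fold"]] else st.2)
  else if PySem.Str.isIn "raise" (PySem.Str.lower action) then
    (st.1 ++ ["raise"],
     if PySem.Str.isIn "hero" action then st.2 ++ [st.1 ++ ["hero raise"]] else st.2)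
  else if PySem.Str.isIn "call" (PySem.Str.lower action) then
    (st.1 ++ ["call"],
     if PySem.Str.isIn "hero" action then st.2 ++ [st.1 ++ ["hero call"]] else st.2)
  else if PySem.Str.isIn "check" (PySem.Str.lower action) then
    (st.1 ++ ["check"],
     if PySem.Str.isIn "hero" action then st.2 ++ [st.1 ++ ["hero check"]] else st.2)
  else if PySem.Str.isIn "all-in" (PySem.Str.lower action) then
    (st.1 ++ ["all-in"],
     if PySem.Str.isIn "hero" action then st.2 ++ [st.1 ++ ["hero all-in"]] else st.2)
  else st

def process_action_sequence (action_sequence : List String) : List (List String) :=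
  (action_sequence.foldl pvStepA ([], [])).2

-- ===== PORT B =====
def pvKEYWORDS : List String := ["fold", "raise", "call", "check", "all-in"]

-- first keyword of the table contained in `low` (the inner for/break loop of Source B)
def pvFirstKw : List String → String → Option String
  | [], _ => none
  | kw :: rest, low => if PySem.Str.isIn kw low then some kw else pvFirstKw rest low

def pvClassify (action : String) : Option (String × Bool) :=
  (pvFirstKw pvKEYWORDS (PySem.Str.lower action)).map
    (fun kw => (kw, PySem.Str.isIn "hero" action))

def process_action_sequence_alt (action_sequence : List String) : List (List String) :=
  let tagged := action_sequence.filterMap pvClassify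
  let canon := tagged.map Prod.fst
  (PySem.List.enumerate tagged 0).filterMap (fun p =>
    if p.2.2 then
      some (PySem.List.slice canon none (some p.1) ++ ["hero " ++ p.2.1])
    else none)

-- ===== PRECONDITION & SPEC =====
def Spec_process_action_sequence (action_sequence : List String) (out : List (List String)) : Prop := out = process_action_sequence_alt action_sequence
instance (action_sequence : List String) (out : List (List String)) : Decidable (Spec_process_action_sequence action_sequence out) := by unfold Spec_process_action_sequence; infer_instance

-- ===== CLAIM (what is proved, stated in full; the proofs are below) =====
def Claim_equal_process_action_sequence : Prop := ∀ (action_sequence : List String), Dom_process_action_sequence action_sequence → Spec_process_action_sequence action_sequence (process_action_sequence action_sequence)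

-- ===== LEMMAS AND PROOFS =====

-- snapshots produced by the tagged suffix `T`, given already-emitted canonical prefix `pre`
def pvSnap : List String → List (String × Bool) → List (List String)
  | _, [] => []
  | pre, (kw, h) :: t =>
    (if h then [pre ++ ["hero " ++ kw]] else []) ++ pvSnap (pre ++ [kw]) t

theorem pvStepA_eq (pre : List String) (acc : List (List String)) (a : String) :
    pvStepA (pre, acc) a =
      match pvClassify a with
      | none => (pre, acc)
      | some (kw, h) => (pre ++ [kw], acc ++ (if h then [pre ++ ["hero " ++ kw]] else [])) := by
  unfold pvStepA pvClassify pvKEYWORDS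
  split_ifs <;> simp_all [pvFirstKw]

theorem pvFoldA_eq (actions : List String) :
    ∀ (pre : List String) (acc : List (List String)),
      actions.foldl pvStepA (pre, acc) =
        (pre ++ (actions.filterMap pvClassify).map Prod.fst,
         acc ++ pvSnap pre (actions.filterMap pvClassify)) := by
  induction actions with
  | nil => intro pre acc; simp [pvSnap]
  | cons a t ih =>
    intro pre acc
    simp only [List.foldl_cons, List.filterMap_cons, pvStepA_eq]
    cases h : pvClassify a with
    | none => simp [ih]
    | some p =>
      obtain ⟨kw, hh⟩ := p
      simp only [ih, pvSnap]
      cases hh <;> simp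

theorem pvSnap_eq (T : List (String × Bool)) :
    ∀ (pre : List String),
      (PySem.List.enumerate T (pre.length : Int)).filterMap (fun p =>
          if p.2.2 then
            some (PySem.List.slice (pre ++ T.map Prod.fst) none (some p.1) ++ ["hero " ++ p.2.1])
          else none)
        = pvSnap pre T := by
  induction T with
  | nil => intro pre; simp [PySem.List.enumerate_nil, pvSnap]
  | cons x t ih =>
    intro pre
    obtain ⟨kw, h⟩ := x
    have hslice : PySem.List.slice (pre ++ (kw :: t.map Prod.fst)) none (some (pre.length : Int))
        = pre := by
      rw [PySem.List.slice_to_natCast]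
      exact List.take_left
    have hcast : ((pre.length : Int) + 1) = (((pre ++ [kw]).length : Nat) : Int) := by
      simp
    rw [PySem.List.enumerate_cons]
    simp only [List.filterMap_cons, List.map_cons, hslice]
    have hrest : pre ++ kw :: t.map Prod.fst = (pre ++ [kw]) ++ t.map Prod.fst := by simp
    rw [hrest, hcast, ih (pre ++ [kw])]
    cases h <;> simp [pvSnap]

-- ===== VERDICT (by name: the statement is the Claim_ definition above) =====
theorem process_action_sequence_spec : Claim_equal_process_action_sequence := by
  intro actions _
  unfold Spec_process_action_sequence process_action_sequence process_action_sequence_alt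
  rw [pvFoldA_eq]
  have := pvSnap_eq (actions.filterMap pvClassify) []
  simpa using this.symm
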